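-- pv_equiv track=rewrite | github.com/NoahLaforet/CataanBot | src/cataanbot/recommender.py | _trim_pack
-- ===== SOURCE A (Python) =====
-- def _trim_pack(pack: dict[str, int], target_total: int) -> dict[str, int]:
--     """Shrink ``pack`` down to ``target_total`` cards, dropping from the
--     largest bucket first. Buckets that hit zero are removed entirely so
--     the caller doesn't end up with ``{ORE: 0}`` noise."""
--     out = {r: int(n) for r, n in pack.items() if n > 0}
--     remaining = sum(out.values())
--     while remaining > target_total and out:
--         top = max(out, key=out.get)
--         out[top] -= 1
--         if out[top] <= 0:
--             del out[top]
--         remaining -= 1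
--     return out
-- ===== SOURCE B (Python) =====
-- # Closed-form trim: binary-search the leveling threshold L, then assign min(n,L)/L+1 in one pass
--
-- def _trim_pack(pack, target_total):
--     items = [(r, int(n)) for r, n in pack.items() if n > 0]
--     total = sum(n for _, n in items)
--     if total <= target_total:
--         return dict(items)
--     if target_total <= 0:
--         return {}
--     def capped(level):
--         return sum(min(n, level) for _, n in items)
--     lo, hi = 0, max(n for _, n in items)
--     while hi - lo > 1:
--         mid = (lo + hi) // 2
--         if capped(mid) <= target_total:
--             lo = mid
--         else:
--             hi = mid
--     L = lo
--     r = target_total - capped(L)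
--     big = sum(1 for _, n in items if n > L)
--     trimmed = []
--     seen = 0
--     for rname, n in items:
--         if n > L:
--             seen += 1
--             w = L + 1 if seen > big - r else L
--         else:
--             w = n
--         if w > 0:
--             trimmed.append((rname, w))
--     return dict(trimmed)
-- ===== Notes on version B (the rewrite author's own statement) =====
-- stated objective: faster
-- what changed: Replaces the card-by-card while loop (argmax scan per removed card) by a closed form: binary-search the leveling threshold L with capped-sum <= target < capped-sum(L+1), then build the result in one pass giving buckets above L the value L or L+1 (the last r big buckets keep L+1, matching A's first-max tie-breaking).
import Mathlib
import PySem

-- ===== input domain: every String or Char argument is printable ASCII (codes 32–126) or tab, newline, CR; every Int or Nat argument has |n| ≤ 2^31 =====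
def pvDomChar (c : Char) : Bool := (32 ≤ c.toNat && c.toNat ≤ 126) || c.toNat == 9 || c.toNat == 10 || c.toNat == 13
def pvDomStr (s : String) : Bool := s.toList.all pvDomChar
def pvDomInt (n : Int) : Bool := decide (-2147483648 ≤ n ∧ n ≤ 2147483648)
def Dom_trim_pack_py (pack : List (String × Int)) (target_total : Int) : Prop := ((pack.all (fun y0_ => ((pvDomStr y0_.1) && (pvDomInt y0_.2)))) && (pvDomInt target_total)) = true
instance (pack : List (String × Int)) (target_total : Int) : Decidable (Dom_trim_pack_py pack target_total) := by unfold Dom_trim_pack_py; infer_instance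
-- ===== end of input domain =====

-- B replaces A's card-by-card while loop by a binary-searched leveling threshold plus a single
-- assignment pass (measured faster); proved to return the same dict on every duplicate-key-free input.


-- ===== PORT A =====
-- while remaining > target_total and out: top = max(out, key=out.get); out[top] -= 1;
-- if out[top] <= 0: del out[top]   (out.get on a present key is ported as getD _ 0)
def trimLoopA (out : PySem.Dict String Int) (remaining target_total : Int) :
    PySem.Dict String Int :=
  if _h : target_total < remaining ∧ out.items ≠ [] then
    match PySem.List.max? out.keys (fun k => out.getD k 0) with
    | none => out
    | some top =>
      let out1 := out.modify top 0 (fun v => v - 1)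
      let out2 := if out1.getD top 0 ≤ 0 then out1.erase top else out1
      trimLoopA out2 (remaining - 1) target_total
  else out
termination_by (remaining - target_total).toNat
decreasing_by omega

def trim_pack_py (pack : List (String × Int)) (target_total : Int) : List (String × Int) :=
  let out := pack.foldl (fun d p => if 0 < p.2 then d.insert p.1 p.2 else d) PySem.Dict.empty
  let remaining := out.values.sum
  (trimLoopA out remaining target_total).items

-- ===== PORT B =====
-- def capped(level): return sum(min(n, level) for _, n in items)
def cappedB (items : List (String × Int)) (level : Int) : Int :=
  (items.map (fun p => min p.2 level)).sum

-- the lo/hi bisection for the leveling threshold L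
def bsearchB (items : List (String × Int)) (t lo hi : Int) : Int :=
  if _h : 1 < hi - lo then
    let mid := PySem.Int.floordiv (lo + hi) 2
    if cappedB items mid ≤ t then bsearchB items t mid hi
    else bsearchB items t lo mid
  else lo
termination_by (hi - lo).toNat
decreasing_by
  · have h1 : lo + 1 ≤ PySem.Int.floordiv (lo + hi) 2 :=
      (PySem.Int.le_floordiv_iff_mul_le (by omega)).mpr (by omega)
    omega
  · have h2 : PySem.Int.floordiv (lo + hi) 2 < hi :=
      (PySem.Int.floordiv_lt_iff_lt_mul (by omega)).mpr (by omega)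
    omega

-- B1: the binary search finds the unique leveling threshold

def trim_pack_py_alt (pack : List (String × Int)) (target_total : Int) : List (String × Int) :=
  let items := pack.filter (fun p => 0 < p.2)
  let total := (items.map (fun p => p.2)).sum
  if total ≤ target_total then (PySem.Dict.ofList items).items
  else if target_total ≤ 0 then []
  else
    let hi := ((PySem.List.max? (items.map (fun p => p.2)) (fun n => n)).getD 0)
    let L := bsearchB items target_total 0 hi
    let r := target_total - cappedB items L
    let big : Int := ((items.countP (fun p => decide (L < p.2)) : Nat) : Int)
    let st := items.foldl
      (fun (st : Int × List (String × Int)) p =>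
        if L < p.2 then
          let seen := st.1 + 1
          let w := if big - r < seen then L + 1 else L
          (seen, if 0 < w then st.2 ++ [(p.1, w)] else st.2)
        else
          (st.1, if 0 < p.2 then st.2 ++ [(p.1, p.2)] else st.2))
      ((0 : Int), ([] : List (String × Int)))
    (PySem.Dict.ofList st.2).items

-- ===== PRECONDITION & SPEC =====
-- pack is a Python dict, which cannot hold the same key twice: association lists with
-- duplicate keys represent no Python input, so they are excluded (A returns on every dict).
def Pre_trim_pack_py (pack : List (String × Int)) (target_total : Int) : Prop :=
  (pack.map Prod.fst).Nodup
instance (pack : List (String × Int)) (target_total : Int) : Decidable (Pre_trim_pack_py pack target_total) := by unfold Pre_trim_pack_py; infer_instance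

def pvWitness_trim_pack_py : (List (String × Int)) × Int := ([("wood", 3), ("ore", 5)], 4)

def Spec_trim_pack_py (pack : List (String × Int)) (target_total : Int) (out : List (String × Int)) : Prop := out = trim_pack_py_alt pack target_total
instance (pack : List (String × Int)) (target_total : Int) (out : List (String × Int)) : Decidable (Spec_trim_pack_py pack target_total out) := by unfold Spec_trim_pack_py; infer_instance

-- ===== CLAIM (what is proved, stated in full; the proofs are below) =====
def Claim_equal_trim_pack_py : Prop := ∀ (pack : List (String × Int)) (target_total : Int), Dom_trim_pack_py pack target_total → Pre_trim_pack_py pack target_total → Spec_trim_pack_py pack target_total (trim_pack_py pack target_total)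

-- ===== LEMMAS AND PROOFS =====

def pvSum (l : List (String × Int)) : Int := (l.map (fun p => p.2)).sum

def pvBig (l : List (String × Int)) (L : Int) : Int := ((l.countP (fun p => decide (L < p.2)) : Nat) : Int)

def pvPos (l : List (String × Int)) : Prop := ∀ p ∈ l, 1 ≤ p.2

def pvCut (l : List (String × Int)) (t L : Int) : Nat :=
  (pvBig l L - (t - cappedB l L)).toNat

-- invariants carried from one loop iteration to the next

def assignList : List (String × Int) → Int → Nat → List (String × Int)
  | [], _, _ => []
  | p :: rest, L, cut =>
    if L < p.2 then
      match cut with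
      | 0 => (p.1, L + 1) :: assignList rest L 0
      | c + 1 => (if 0 < L then [(p.1, L)] else []) ++ assignList rest L c
    else (if 0 < p.2 then [(p.1, p.2)] else []) ++ assignList rest L cut

-- A2

-- A2
theorem capped_succ (l : List (String × Int)) (L : Int) :
    cappedB l (L + 1) = cappedB l L + pvBig l L := by
  induction l with
  | nil => simp [cappedB, pvBig]
  | cons p rest ih =>
    simp only [cappedB, pvBig, List.map_cons, List.sum_cons, List.countP_cons] at *
    rw [ih]
    split <;> rename_i hs <;> simp only [decide_eq_true_eq] at hs <;> push_cast <;> omega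

-- A3

-- A3
theorem capped_eq_sum (l : List (String × Int)) (M : Int) (h : ∀ p ∈ l, p.2 ≤ M) :
    cappedB l M = pvSum l := by
  induction l with
  | nil => simp [cappedB, pvSum]
  | cons p rest ih =>
    simp only [cappedB, pvSum, List.map_cons, List.sum_cons] at *
    have h1 := h p (by simp)
    have := ih (fun q hq => h q (by simp [hq]))
    omega

-- A4

-- A4
theorem capped_zero (l : List (String × Int)) (h : pvPos l) : cappedB l 0 = 0 := by
  induction l with
  | nil => simp [cappedB]
  | cons p rest ih =>
    simp only [cappedB, List.map_cons, List.sum_cons] at *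
    have h1 := h p (by simp)
    have := ih (fun q hq => h q (by simp [hq]))
    omega

-- A5

-- A5
theorem capped_le_sum (l : List (String × Int)) (L : Int) : cappedB l L ≤ pvSum l := by
  simp only [cappedB, pvSum]
  exact List.sum_le_sum (fun p _ => by omega)

-- A6

-- A6
theorem le_of_capped_ge (l : List (String × Int)) (M : Int) (h : pvSum l ≤ cappedB l M) :
    ∀ p ∈ l, p.2 ≤ M := by
  induction l with
  | nil => simp
  | cons p rest ih =>
    simp only [cappedB, pvSum, List.map_cons, List.sum_cons] at h
    have h1 := capped_le_sum rest M
    intro q hq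
    rcases List.mem_cons.mp hq with hq | hq
    · subst hq
      simp only [pvSum, cappedB] at h1 ⊢
      omega
    · exact ih (by simp only [cappedB, pvSum] at *; omega) q hq

theorem sum_nil_of_le_zero (l : List (String × Int)) (hpos : pvPos l) (h : pvSum l ≤ 0) :
    l = [] := by
  cases l with
  | nil => rfl
  | cons p rest =>
    exfalso
    have : 0 < pvSum (p :: rest) := by
      simp only [pvSum, List.map_cons]
      refine List.sum_pos _ (fun x hx => ?_) (by simp)
      simp only [List.mem_cons, List.mem_map] at hx
      rcases hx with h | ⟨q, hq, rfl⟩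
      · subst h; exact hpos p (by simp)
      · exact hpos q (by simp [hq])
    omega

theorem capped_decomp (l1 l2 : List (String × Int)) (p : String × Int) (lv : Int) :
    cappedB (l1 ++ p :: l2) lv = cappedB l1 lv + min p.2 lv + cappedB l2 lv := by
  simp only [cappedB, List.map_append, List.map_cons, List.sum_append, List.sum_cons]
  omega

theorem pvBig_decomp (l1 l2 : List (String × Int)) (p : String × Int) (lv : Int) :
    pvBig (l1 ++ p :: l2) lv = pvBig l1 lv + (if lv < p.2 then 1 else 0) + pvBig l2 lv := by
  simp only [pvBig, List.countP_append, List.countP_cons]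
  split <;> rename_i hs <;> simp only [decide_eq_true_eq] at hs
  · rw [if_pos hs]; push_cast; omega
  · rw [if_neg hs]; push_cast; omega

theorem exists_big (l : List (String × Int)) (L : Int) (h : 0 < pvBig l L) :
    ∃ q ∈ l, L < q.2 := by
  have : 0 < l.countP (fun p => decide (L < p.2)) := by simp only [pvBig] at h; omega
  rw [List.countP_pos_iff] at this
  simpa using this

-- P2: the main loop invariant — A's loop realises the closed-form assignment

def stepMax {α : Type} (key : α → Int) (acc : Option α) (x : α) : Option α :=
  match acc with
  | none => some x
  | some m => if key m < key x then some x else some m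

theorem max?_eq_foldl_stepMax {α : Type} (key : α → Int) (l : List α) :
    PySem.List.max? l key = l.foldl (stepMax key) none := rfl

theorem stepMax_none {α : Type} (key : α → Int) (x : α) : stepMax key none x = some x := rfl

theorem stepMax_some {α : Type} (key : α → Int) (m x : α) :
    stepMax key (some m) x = if key m < key x then some x else some m := rfl

-- M1: max? only looks at key values on members

-- M1: max? only looks at key values on members
theorem max?_congr_key {α : Type} (k1 k2 : α → Int) :
    ∀ (l : List α) (acc : Option α), (∀ x ∈ l, k1 x = k2 x) → (∀ a, acc = some a → k1 a = k2 a) →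
    l.foldl (stepMax k1) acc = l.foldl (stepMax k2) acc := by
  intro l
  induction l with
  | nil => intro acc _ _; rfl
  | cons x rest ih =>
    intro acc hl hacc
    simp only [List.foldl_cons]
    have hx : k1 x = k2 x := hl x (by simp)
    have hrest : ∀ y ∈ rest, k1 y = k2 y := fun y hy => hl y (by simp [hy])
    cases acc with
    | none =>
      rw [stepMax_none, stepMax_none]
      refine ih (some x) hrest ?_
      intro a ha
      obtain rfl : x = a := by injection ha
      exact hx
    | some m =>
      have hm : k1 m = k2 m := hacc m rfl
      rw [stepMax_some, stepMax_some, hx, hm]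
      refine ih _ hrest ?_
      intro a ha
      split at ha <;> (obtain rfl : _ = a := by injection ha) <;> first | exact hx | exact hm

theorem max?_congr {α : Type} (l : List α) (k1 k2 : α → Int) (h : ∀ x ∈ l, k1 x = k2 x) :
    PySem.List.max? l k1 = PySem.List.max? l k2 := by
  rw [max?_eq_foldl_stepMax, max?_eq_foldl_stepMax]
  exact max?_congr_key k1 k2 l none h (by simp)

-- M2: max? over a mapped list

-- M2: max? over a mapped list
theorem max?_map_aux {α β : Type} (f : α → β) (k : β → Int) :
    ∀ (l : List α) (acc : Option α),
    (l.map f).foldl (stepMax k) (acc.map f)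
      = Option.map f (l.foldl (stepMax (fun x => k (f x))) acc) := by
  intro l
  induction l with
  | nil => intro acc; rfl
  | cons x rest ih =>
    intro acc
    simp only [List.map_cons, List.foldl_cons]
    cases acc with
    | none => exact ih (some x)
    | some m =>
      simp only [Option.map_some, stepMax_some]
      rw [show (if k (f m) < k (f x) then some (f x) else some (f m))
            = Option.map f (if k (f m) < k (f x) then some x else some m) by split <;> rfl]
      split <;> exact ih _

theorem max?_map {α β : Type} (f : α → β) (k : β → Int) (l : List α) :
    PySem.List.max? (l.map f) k = Option.map f (PySem.List.max? l (fun x => k (f x))) := by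
  rw [max?_eq_foldl_stepMax, max?_eq_foldl_stepMax]
  exact max?_map_aux f k l none

-- M3: max? returns the FIRST maximal element

-- M3: max? returns the FIRST maximal element
theorem max?_first_aux {α : Type} (key : α → Int) :
    ∀ (l : List α) (m p : α),
    l.foldl (stepMax key) (some m) = some p →
    p = m ∨ (key m < key p ∧ ∃ l1 l2, l = l1 ++ p :: l2 ∧ ∀ q ∈ l1, key q < key p) := by
  intro l
  induction l with
  | nil => intro m p h; left; simpa using h.symm
  | cons x rest ih =>
    intro m p h
    simp only [List.foldl_cons, stepMax_some] at h
    by_cases hx : key m < key x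
    · rw [if_pos hx] at h
      rcases ih x p h with rfl | ⟨hlt, l1, l2, rfl, hall⟩
      · right
        exact ⟨hx, [], rest, rfl, by simp⟩
      · right
        refine ⟨by omega, x :: l1, l2, rfl, ?_⟩
        intro q hq
        rcases List.mem_cons.mp hq with rfl | hq
        · omega
        · exact hall q hq
    · rw [if_neg hx] at h
      rcases ih m p h with rfl | ⟨hlt, l1, l2, rfl, hall⟩
      · left; rfl
      · right
        refine ⟨hlt, x :: l1, l2, rfl, ?_⟩
        intro q hq
        rcases List.mem_cons.mp hq with rfl | hq
        · omega
        · exact hall q hq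

theorem max?_first {α : Type} (key : α → Int) (l : List α) (p : α)
    (h : PySem.List.max? l key = some p) :
    ∃ l1 l2, l = l1 ++ p :: l2 ∧ ∀ q ∈ l1, key q < key p := by
  cases l with
  | nil => simp [PySem.List.max?] at h
  | cons x rest =>
    rw [max?_eq_foldl_stepMax, List.foldl_cons, stepMax_none] at h
    rcases max?_first_aux key rest x p h with rfl | ⟨hlt, l1, l2, rfl, hall⟩
    · exact ⟨[], rest, rfl, by simp⟩
    · refine ⟨x :: l1, l2, rfl, ?_⟩
      intro q hq
      rcases List.mem_cons.mp hq with rfl | hq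
      · omega
      · exact hall q hq
-- S1: a prefix of small positive entries passes through unchanged

-- S1: a prefix of small positive entries passes through unchanged
theorem assign_small_append (l1 rest : List (String × Int)) (L : Int) (cut : Nat)
    (h : ∀ q ∈ l1, ¬ L < q.2 ∧ 0 < q.2) :
    assignList (l1 ++ rest) L cut = l1 ++ assignList rest L cut := by
  induction l1 with
  | nil => simp
  | cons q l1 ih =>
    have hq := h q (by simp)
    simp only [List.cons_append, assignList, if_neg hq.1, if_pos hq.2,
      ih (fun x hx => h x (by simp [hx]))]
    simp

-- S2: cut 0 on a list of values in [1, L+1] is the identity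

-- S2: cut 0 on a list of values in [1, L+1] is the identity
theorem assign_zero_id (L : Int) (hL : 0 ≤ L) :
    ∀ l : List (String × Int), (∀ p ∈ l, 1 ≤ p.2 ∧ p.2 ≤ L + 1) → assignList l L 0 = l := by
  intro l
  induction l with
  | nil => intro _; rfl
  | cons p rest ih =>
    intro h
    have hp := h p (by simp)
    have hrest := ih (fun q hq => h q (by simp [hq]))
    by_cases hbig : L < p.2
    · have : p.2 = L + 1 := by omega
      simp only [assignList, if_pos hbig, hrest]
      rw [← this]
    · simp only [assignList, if_neg hbig, if_pos (by omega : (0:Int) < p.2), hrest]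
      simp
-- S3: an entry that stays above L may change value without affecting the assignment

-- S3: an entry that stays above L may change value without affecting the assignment
theorem assign_congr_big (k : String) (a b L : Int) (ha : L < a) (hb : L < b)
    (l2 : List (String × Int)) :
    ∀ (l1 : List (String × Int)) (cut : Nat),
    assignList (l1 ++ (k, a) :: l2) L cut = assignList (l1 ++ (k, b) :: l2) L cut := by
  intro l1
  induction l1 with
  | nil =>
    intro cut
    cases cut with
    | zero => simp [assignList, if_pos ha, if_pos hb]
    | succ c => simp [assignList, if_pos ha, if_pos hb]
  | cons q l1 ih =>
    intro cut
    simp only [List.cons_append, assignList]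
    by_cases hq : L < q.2
    · cases cut with
      | zero => simp only [if_pos hq, ih 0]
      | succ c => simp only [if_pos hq, ih c]
    · simp only [if_neg hq, ih cut]

-- S4: assignment keeps keys (in order), possibly dropping some

-- S4: assignment keeps keys (in order), possibly dropping some
theorem assign_keys_sublist (L : Int) :
    ∀ (l : List (String × Int)) (cut : Nat),
    ((assignList l L cut).map Prod.fst).Sublist (l.map Prod.fst) := by
  intro l
  induction l with
  | nil => intro cut; simp [assignList]
  | cons p rest ih =>
    intro cut
    by_cases hp : L < p.2
    · cases cut with
      | zero =>
        simp only [assignList, if_pos hp, List.map_cons]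
        exact (ih 0).cons₂ p.1
      | succ c =>
        simp only [assignList, if_pos hp, List.map_cons]
        by_cases hL : 0 < L
        · simp only [if_pos hL, List.map_cons, List.singleton_append]
          exact (ih c).cons₂ p.1
        · simp only [if_neg hL, List.nil_append]
          exact (ih c).cons p.1
    · simp only [assignList, if_neg hp, List.map_cons]
      by_cases hq : 0 < p.2
      · simp only [if_pos hq, List.map_cons, List.singleton_append]
        exact (ih cut).cons₂ p.1
      · simp only [if_neg hq, List.nil_append]
        exact (ih cut).cons p.1
-- F1: B's single pass computes the assignment

-- F1: B's single pass computes the assignment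
theorem foldB_eq_assign (L big r : Int) (hL : 0 ≤ L) :
    ∀ (l : List (String × Int)) (seen : Int) (acc : List (String × Int)),
    (l.foldl
      (fun (st : Int × List (String × Int)) p =>
        if L < p.2 then
          (st.1 + 1, if 0 < (if big - r < st.1 + 1 then L + 1 else L)
            then st.2 ++ [(p.1, if big - r < st.1 + 1 then L + 1 else L)] else st.2)
        else
          (st.1, if 0 < p.2 then st.2 ++ [(p.1, p.2)] else st.2))
      (seen, acc)).2 = acc ++ assignList l L (big - r - seen).toNat := by
  intro l
  induction l with
  | nil => intro seen acc; simp [assignList]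
  | cons p rest ih =>
    intro seen acc
    simp only [List.foldl_cons]
    by_cases hp : L < p.2
    · rw [if_pos hp]
      by_cases hc : big - r - seen ≤ 0
      · -- cut = 0 : this and all later big entries keep L+1
        have hcut : (big - r - seen).toNat = 0 := by omega
        have hw : big - r < seen + 1 := by omega
        simp only [if_pos hw]
        rw [show (if (0:Int) < L + 1 then acc ++ [(p.1, L + 1)] else acc) = acc ++ [(p.1, L+1)] from if_pos (by omega)]
        rw [ih (seen + 1) (acc ++ [(p.1, L + 1)])]
        rw [hcut, show ((big - r - (seen+1)).toNat = 0) from by omega]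
        simp [assignList, if_pos hp]
      · -- cut = c+1 : lower this entry to L
        have hw : ¬ big - r < seen + 1 := by omega
        simp only [if_neg hw]
        rw [ih (seen + 1)]
        rcases Nat.exists_eq_add_of_lt (show 0 < (big - r - seen).toNat by omega) with ⟨c, hc2⟩
        rw [show (big - r - seen).toNat = c + 1 from by omega]
        rw [show (big - r - (seen + 1)).toNat = c from by omega]
        simp only [assignList, if_pos hp]
        split
        · simp
        · simp
    · rw [if_neg hp, ih seen]
      simp only [assignList, if_neg hp]
      split
      · simp
      · simp
-- D1: dict(pairs) over distinct keys is the pair list itself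

-- D1: dict(pairs) over distinct keys is the pair list itself
theorem ofList_items_of_nodup (l : List (String × Int)) (h : (l.map Prod.fst).Nodup) :
    (PySem.Dict.ofList l).items = l := by
  have := PySem.Dict.items_foldl_insert_fresh (l := l) (d := PySem.Dict.empty)
    (k := Prod.fst) (v := Prod.snd) (by intro a _; rfl) h
  simpa [PySem.Dict.ofList, PySem.Dict.update] using this

-- D2: one iteration of A's loop body, seen on the items list

-- D2: one iteration of A's loop body, seen on the items list
theorem step_bridge (d : PySem.Dict String Int) (hn : d.keys.Nodup) (hpos : pvPos d.items)
    (hne : d.items ≠ []) :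
    ∃ (top : String) (M : Int) (l1 l2 : List (String × Int)),
      PySem.List.max? d.keys (fun k => d.getD k 0) = some top ∧
      d.items = l1 ++ (top, M) :: l2 ∧
      (∀ q ∈ l1, q.2 < M) ∧ (∀ q ∈ d.items, q.2 ≤ M) ∧ 1 ≤ M ∧
      ((if (d.modify top 0 (fun v => v - 1)).getD top 0 ≤ 0
          then (d.modify top 0 (fun v => v - 1)).erase top
          else d.modify top 0 (fun v => v - 1)).items
        = l1 ++ (if 1 < M then (top, M - 1) :: l2 else l2)) := by
  -- name the first maximal pair
  have hkeys : d.keys = d.items.map Prod.fst := rfl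
  have hmax1 : PySem.List.max? d.keys (fun k => d.getD k 0)
      = Option.map Prod.fst (PySem.List.max? d.items (fun p => d.getD p.1 0)) := by
    rw [hkeys]; exact max?_map Prod.fst (fun k => d.getD k 0) d.items
  have hmax2 : PySem.List.max? d.items (fun p => d.getD p.1 0)
      = PySem.List.max? d.items (fun p => p.2) := by
    refine max?_congr d.items _ _ ?_
    rintro ⟨k, v⟩ hq
    exact PySem.Dict.getD_of_mem_items d hq hn 0
  obtain ⟨p, hp⟩ : ∃ p, PySem.List.max? d.items (fun p => p.2) = some p := by
    cases hmp : PySem.List.max? d.items (fun p => p.2) with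
    | none => exact absurd ((PySem.List.max?_eq_none_iff d.items _).mp hmp) hne
    | some p => exact ⟨p, rfl⟩
  obtain ⟨top, M⟩ := p
  obtain ⟨l1, l2, hdec, hfirst⟩ := max?_first _ _ _ hp
  have hmem : (top, M) ∈ d.items := by rw [hdec]; simp
  have hmaxall : ∀ q ∈ d.items, q.2 ≤ M := PySem.List.max?_isMax hp
  have hM1 : 1 ≤ M := hpos _ hmem
  have hgd : d.getD top 0 = M := PySem.Dict.getD_of_mem_items d hmem hn 0
  -- keys are distinct, so no other pair carries the key `top`
  have hn' : ((l1 ++ (top, M) :: l2).map Prod.fst).Nodup := by rw [← hdec]; exact hn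
  rw [List.map_append, List.map_cons] at hn'
  have h1 : ∀ q ∈ l1, ¬ (q.1 = top) := by
    intro q hq he
    have hmem1 : top ∈ l1.map Prod.fst := List.mem_map.mpr ⟨q, hq, he⟩
    have hdisj := (List.nodup_append.mp hn').2.2
    exact (hdisj top hmem1 top List.mem_cons_self) rfl
  have h2 : ∀ q ∈ l2, ¬ (q.1 = top) := by
    intro q hq he
    have hmem2 : top ∈ l2.map Prod.fst := List.mem_map.mpr ⟨q, hq, he⟩
    have := (List.nodup_append.mp hn').2.1
    rw [List.nodup_cons] at this
    exact this.1 hmem2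
  -- the modified dict, on the items level
  have hcont : d.contains top = true :=
    (PySem.Dict.contains_iff_mem_keys d top).mpr (PySem.Dict.mem_keys_of_mem_items d hmem)
  have hd1 : (d.modify top 0 (fun v => v - 1)).items
      = l1 ++ (top, M - 1) :: l2 := by
    show (d.insert top (d.getD top 0 - 1)).items = _
    rw [hgd, PySem.Dict.items_insert_of_contains d _ hcont, hdec, List.map_append,
      List.map_cons]
    congr 1
    · refine (List.map_congr_left ?_).trans (List.map_id l1)
      intro q hq
      simp [h1 q hq]
    · congr 1
      · simp
      · refine (List.map_congr_left ?_).trans (List.map_id l2)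
        intro q hq
        simp [h2 q hq]
  have hgd1 : (d.modify top 0 (fun v => v - 1)).getD top 0 = M - 1 := by
    rw [PySem.Dict.getD_modify_self, hgd]
  refine ⟨top, M, l1, l2, ?_, hdec, hfirst, hmaxall, hM1, ?_⟩
  · rw [hmax1, hmax2, hp]; rfl
  · by_cases hM : 1 < M
    · rw [if_neg (by omega), if_pos hM, hd1]
    · rw [if_pos (by rw [hgd1]; omega), if_neg hM]
      have herase : ((d.modify top 0 (fun v => v - 1)).erase top).items
          = (d.modify top 0 (fun v => v - 1)).items.filter (fun q => !(q.1 == top)) := rfl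
      rw [herase, hd1, List.filter_append, List.filter_cons]
      rw [List.filter_eq_self.mpr (fun q hq => by simpa using h1 q hq),
        List.filter_eq_self.mpr (fun q hq => by simpa using h2 q hq)]
      simp

-- invariants carried from one loop iteration to the next
theorem step_facts (top : String) (M : Int) (l1 l2 : List (String × Int))
    (hfirst : ∀ q ∈ l1, q.2 < M) (hpos : pvPos (l1 ++ (top, M) :: l2)) (hM1 : 1 ≤ M)
    (hn : (((l1 ++ (top, M) :: l2)).map Prod.fst).Nodup) :
    pvSum (l1 ++ (if 1 < M then (top, M - 1) :: l2 else l2)) = pvSum (l1 ++ (top, M) :: l2) - 1 ∧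
    pvPos (l1 ++ (if 1 < M then (top, M - 1) :: l2 else l2)) ∧
    ((l1 ++ (if 1 < M then (top, M - 1) :: l2 else l2)).map Prod.fst).Nodup := by
  by_cases hM : 1 < M
  · rw [if_pos hM]
    refine ⟨?_, ?_, ?_⟩
    · simp only [pvSum, List.map_append, List.map_cons, List.sum_append, List.sum_cons]
      omega
    · intro q hq
      simp only [List.mem_append, List.mem_cons] at hq
      rcases hq with h | h | h
      · exact hpos q (by simp [h])
      · rw [h]; omega
      · exact hpos q (by simp [h])
    · simpa using hn
  · rw [if_neg hM]
    refine ⟨?_, ?_, ?_⟩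
    · simp only [pvSum, List.map_append, List.map_cons, List.sum_append, List.sum_cons]
      omega
    · intro q hq
      simp only [List.mem_append] at hq
      rcases hq with h | h
      · exact hpos q (by simp [h])
      · exact hpos q (by simp [h])
    · refine List.Nodup.sublist ?_ hn
      refine List.Sublist.map _ (List.Sublist.append_left ?_ l1)
      exact List.sublist_cons_self _ _

-- P1: with a non-positive target the loop drains the pack completely

-- P1: with a non-positive target the loop drains the pack completely
theorem loop_drain : ∀ (k : Nat) (d : PySem.Dict String Int) (t : Int),
    (pvSum d.items - t).toNat ≤ k → d.keys.Nodup → pvPos d.items → t ≤ 0 →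
    (trimLoopA d (pvSum d.items) t).items = [] := by
  intro k
  induction k with
  | zero =>
    intro d t hk hn hpos ht
    have hnil : d.items = [] := sum_nil_of_le_zero _ hpos (by omega)
    rw [trimLoopA.eq_def, dif_neg (by simp [hnil])]
    exact hnil
  | succ k ih =>
    intro d t hk hn hpos ht
    by_cases hc : t < pvSum d.items ∧ d.items ≠ []
    · obtain ⟨top, M, l1, l2, hmax, hdec, hfirst, hmaxall, hM1, hstep⟩ :=
        step_bridge d hn hpos hc.2
      rw [trimLoopA.eq_def, dif_pos hc, hmax]
      have hfacts := step_facts top M l1 l2 hfirst (hdec ▸ hpos) hM1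
        (show _ from by rw [← hdec]; exact hn)
      have hsum' : pvSum ((if (d.modify top 0 (fun v => v - 1)).getD top 0 ≤ 0
          then (d.modify top 0 (fun v => v - 1)).erase top
          else d.modify top 0 (fun v => v - 1)).items) = pvSum d.items - 1 := by
        rw [hstep, hdec]; exact hfacts.1
      rw [show pvSum d.items - 1
          = pvSum ((if (d.modify top 0 (fun v => v - 1)).getD top 0 ≤ 0
          then (d.modify top 0 (fun v => v - 1)).erase top
          else d.modify top 0 (fun v => v - 1)).items) from hsum'.symm]
      refine ih _ t ?_ ?_ ?_ ht
      · rw [hsum', hdec]; rw [hdec] at hk; omega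
      · show ((_ : PySem.Dict String Int).items.map Prod.fst).Nodup
        rw [hstep]; exact hfacts.2.2
      · rw [hstep]; exact hfacts.2.1
    · rw [trimLoopA.eq_def, dif_neg hc]
      by_cases hnil : d.items = []
      · exact hnil
      · have hle : pvSum d.items ≤ t := by
          by_contra hlt
          exact hc ⟨by omega, hnil⟩
        exact sum_nil_of_le_zero _ hpos (by omega)

-- P2: the main loop invariant — A's loop realises the closed-form assignment
theorem loop_main : ∀ (k : Nat) (d : PySem.Dict String Int) (t L : Int),
    (pvSum d.items - t).toNat ≤ k → d.keys.Nodup → pvPos d.items →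
    0 < t → t < pvSum d.items → 0 ≤ L →
    cappedB d.items L ≤ t → t < cappedB d.items (L + 1) →
    (trimLoopA d (pvSum d.items) t).items = assignList d.items L (pvCut d.items t L) := by
  intro k
  induction k with
  | zero => intro d t L hk _ _ ht0 htsum _ _ _; omega
  | succ k ih =>
    intro d t L hk hn hpos ht0 htsum hL0 hc1 hc2
    have hne : d.items ≠ [] := by
      intro h
      rw [h] at htsum
      simp [pvSum] at htsum
      omega
    obtain ⟨top, M, l1, l2, hmax, hdec, hfirst, hmaxall, hM1, hstep⟩ :=
      step_bridge d hn hpos hne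
    have hfacts := step_facts top M l1 l2 hfirst (hdec ▸ hpos) hM1
      (show _ from by rw [← hdec]; exact hn)
    have hsum' : pvSum ((if (d.modify top 0 (fun v => v - 1)).getD top 0 ≤ 0
        then (d.modify top 0 (fun v => v - 1)).erase top
        else d.modify top 0 (fun v => v - 1)).items) = pvSum d.items - 1 := by
      rw [hstep, hdec]; exact hfacts.1
    -- the maximum is above the final level
    have hcs := capped_succ d.items L
    have hbigpos : 0 < pvBig d.items L := by omega
    obtain ⟨q, hqmem, hqL⟩ := exists_big d.items L hbigpos
    have hML : L + 1 ≤ M := by have := hmaxall q hqmem; omega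
    rw [trimLoopA.eq_def, dif_pos ⟨htsum, hne⟩, hmax]
    by_cases hend : pvSum d.items - 1 ≤ t
    · -- final step: the loop exits after this decrement
      show (trimLoopA (if (d.modify top 0 (fun v => v - 1)).getD top 0 ≤ 0
          then (d.modify top 0 (fun v => v - 1)).erase top
          else d.modify top 0 (fun v => v - 1)) (pvSum d.items - 1) t).items = _
      rw [trimLoopA.eq_def, dif_neg (by intro hcon; exact absurd hcon.1 (by omega))]
      have hall : ∀ p ∈ d.items, p.2 ≤ L + 1 :=
        le_of_capped_ge d.items (L + 1) (by omega)
      have hMeq : M = L + 1 := by have := hall _ (hdec ▸ (by simp : (top, M) ∈ l1 ++ (top, M) :: l2)); omega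
      have hces := capped_eq_sum d.items (L + 1) hall
      have hcut : pvCut d.items t L = 1 := by unfold pvCut; omega
      rw [hstep, hcut, hdec]
      have hsmall : ∀ p ∈ l1, ¬ L < p.2 ∧ 0 < p.2 := by
        intro p hp
        have h1 := hfirst p hp
        have h2 := hpos p (hdec ▸ (by simp [hp] : p ∈ l1 ++ (top, M) :: l2))
        omega
      rw [assign_small_append l1 _ L 1 hsmall]
      have hl2 : ∀ p ∈ l2, 1 ≤ p.2 ∧ p.2 ≤ L + 1 := by
        intro p hp
        have hmem2 : p ∈ d.items := hdec ▸ (by simp [hp])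
        exact ⟨hpos p hmem2, hall p hmem2⟩
      subst hMeq
      show l1 ++ (if 1 < L + 1 then (top, L + 1 - 1) :: l2 else l2) = _
      simp only [assignList, if_pos (by omega : L < L + 1)]
      rw [assign_zero_id L hL0 l2 hl2]
      by_cases h0 : 0 < L
      · rw [if_pos (by omega), if_pos h0]
        simp
      · rw [if_neg (by omega), if_neg h0]
        simp
    · -- the loop continues: one card removed, same level/assignment
      rw [show pvSum d.items - 1 = pvSum ((if (d.modify top 0 (fun v => v - 1)).getD top 0 ≤ 0
          then (d.modify top 0 (fun v => v - 1)).erase top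
          else d.modify top 0 (fun v => v - 1)).items) from hsum'.symm]
      by_cases hM2 : L + 2 ≤ M
      · -- the decremented bucket stays above the level: nothing changes
        have h1M : 1 < M := by omega
        have hstep' : (if (d.modify top 0 (fun v => v - 1)).getD top 0 ≤ 0
            then (d.modify top 0 (fun v => v - 1)).erase top
            else d.modify top 0 (fun v => v - 1)).items = l1 ++ (top, M - 1) :: l2 := by
          rw [hstep, if_pos h1M]
        have hcL : cappedB (l1 ++ (top, M - 1) :: l2) L = cappedB d.items L := by
          rw [hdec, capped_decomp, capped_decomp]; omega
        have hcL1 : cappedB (l1 ++ (top, M - 1) :: l2) (L + 1) = cappedB d.items (L + 1) := by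
          rw [hdec, capped_decomp, capped_decomp]; omega
        have hbg : pvBig (l1 ++ (top, M - 1) :: l2) L = pvBig d.items L := by
          rw [hdec, pvBig_decomp, pvBig_decomp]
          rw [if_pos (by omega : L < (top, M - 1).2), if_pos (by omega : L < (top, M).2)]
        have hmeas : (pvSum (l1 ++ (top, M - 1) :: l2) - t).toNat ≤ k := by
          rw [← hstep', hsum']; omega
        rw [ih _ t L (by rw [hstep']; exact hmeas)
          (by show ((_ : PySem.Dict String Int).items.map Prod.fst).Nodup
              rw [hstep]; exact hfacts.2.2)
          (by rw [hstep]; exact hfacts.2.1) ht0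
          (by rw [hsum']; omega) hL0
          (by rw [hstep', hcL]; omega) (by rw [hstep', hcL1]; omega)]
        rw [hstep']
        have hcuteq : pvCut (l1 ++ (top, M - 1) :: l2) t L = pvCut d.items t L := by
          unfold pvCut; rw [hcL, hbg]
        rw [hcuteq, hdec]
        exact assign_congr_big top (M - 1) M L (by omega) (by omega) l2 l1 _
      · -- the decremented bucket lands exactly on the level
        have hMeq : M = L + 1 := by omega
        have hall : ∀ p ∈ d.items, p.2 ≤ L + 1 := by
          intro p hp; have := hmaxall p hp; omega
        have hces := capped_eq_sum d.items (L + 1) hall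
        subst hMeq
        -- cut is at least 1
        have hcut1 : 0 < pvCut d.items t L := by unfold pvCut; omega
        have hsmall : ∀ p ∈ l1, ¬ L < p.2 ∧ 0 < p.2 := by
          intro p hp
          have h1 := hfirst p hp
          have h2 := hpos p (hdec ▸ (by simp [hp] : p ∈ l1 ++ (top, L + 1) :: l2))
          omega
        by_cases h0 : 0 < L
        · have hstep' : (if (d.modify top 0 (fun v => v - 1)).getD top 0 ≤ 0
              then (d.modify top 0 (fun v => v - 1)).erase top
              else d.modify top 0 (fun v => v - 1)).items = l1 ++ (top, L + 1 - 1) :: l2 := by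
            rw [hstep, if_pos (by omega : (1:Int) < L + 1)]
          have hcL : cappedB (l1 ++ (top, L + 1 - 1) :: l2) L = cappedB d.items L := by
            rw [hdec, capped_decomp, capped_decomp]; omega
          have hcL1 : cappedB (l1 ++ (top, L + 1 - 1) :: l2) (L + 1)
              = cappedB d.items (L + 1) - 1 := by
            rw [hdec, capped_decomp, capped_decomp]; omega
          have hbg : pvBig (l1 ++ (top, L + 1 - 1) :: l2) L = pvBig d.items L - 1 := by
            rw [hdec, pvBig_decomp, pvBig_decomp]
            rw [if_neg (by omega : ¬ L < (top, L + 1 - 1).2), if_pos (by omega : L < (top, L + 1).2)]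
            omega
          rw [ih _ t L (by rw [hstep']; have h := hsum'; rw [hstep'] at h; omega)
            (by show ((_ : PySem.Dict String Int).items.map Prod.fst).Nodup
                rw [hstep]; exact hfacts.2.2)
            (by rw [hstep]; exact hfacts.2.1) ht0
            (by rw [hsum']; omega) hL0
            (by rw [hstep', hcL]; omega) (by rw [hstep', hcL1]; omega)]
          rw [hstep']
          have hcuteq : pvCut (l1 ++ (top, L + 1 - 1) :: l2) t L = pvCut d.items t L - 1 := by
            unfold pvCut; rw [hcL, hbg]; omega
          rw [hcuteq, hdec]
          -- move the now-small first big bucket across assignList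
          have hsmall' : ∀ p ∈ l1 ++ [(top, L + 1 - 1)], ¬ L < p.2 ∧ 0 < p.2 := by
            intro p hp
            rcases List.mem_append.mp hp with h | h
            · exact hsmall p h
            · simp only [List.mem_singleton] at h
              rw [h]; constructor <;> [omega; omega]
          rw [show l1 ++ (top, L + 1 - 1) :: l2 = (l1 ++ [(top, L + 1 - 1)]) ++ l2 by simp]
          rw [assign_small_append _ l2 L _ hsmall', assign_small_append l1 _ L _ hsmall]
          obtain ⟨c, hc⟩ := Nat.exists_eq_add_of_lt hcut1
          rw [show pvCut (l1 ++ (top, L + 1) :: l2) t L = c + 1 from by rw [← hdec]; omega,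
            Nat.add_sub_cancel]
          simp only [assignList, if_pos (by omega : L < (top, L + 1).2)]
          rw [if_pos h0]
          simp
        · -- L = 0 : the bucket is removed; the prefix of strictly smaller buckets is empty
          have hL : L = 0 := by omega
          subst hL
          have hl1 : l1 = [] := by
            cases l1 with
            | nil => rfl
            | cons a as =>
              exfalso
              have h1 := hfirst a (by simp)
              have h2 := hpos a (hdec ▸ (by simp : a ∈ (a :: as) ++ (top, 0 + 1) :: l2))
              omega
          subst hl1
          have hstep' : (if (d.modify top 0 (fun v => v - 1)).getD top 0 ≤ 0
              then (d.modify top 0 (fun v => v - 1)).erase top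
              else d.modify top 0 (fun v => v - 1)).items = l2 := by
            rw [hstep, if_neg (by omega : ¬ (1:Int) < 0 + 1)]
            rfl
          have hcL : cappedB l2 0 = 0 := by
            refine capped_zero l2 ?_
            intro p hp
            exact hpos p (hdec ▸ (by simp [hp]))
          have hcL1 : cappedB l2 (0 + 1) = cappedB d.items (0 + 1) - 1 := by
            rw [hdec, show ([] : List (String × Int)) ++ (top, 0 + 1) :: l2 = [] ++ (top, 0 + 1) :: l2 from rfl, capped_decomp]
            simp [cappedB]
          have hbg : pvBig l2 0 = pvBig d.items 0 - 1 := by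
            rw [hdec, pvBig_decomp]
            rw [if_pos (by omega : (0:Int) < (top, 0 + 1).2)]
            simp [pvBig]
          rw [ih _ t 0 (by rw [hstep'] at hsum' ⊢; omega)
            (by show ((_ : PySem.Dict String Int).items.map Prod.fst).Nodup
                rw [hstep]; exact hfacts.2.2)
            (by rw [hstep]; exact hfacts.2.1) ht0
            (by rw [hsum']; omega) (by omega)
            (by rw [hstep', hcL]; omega) (by rw [hstep', hcL1]; omega)]
          rw [hstep']
          have hcuteq : pvCut l2 t 0 = pvCut d.items t 0 - 1 := by
            unfold pvCut
            rw [hcL, hbg]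
            have : cappedB d.items 0 = 0 := capped_zero d.items hpos
            omega
          rw [hcuteq, hdec]
          obtain ⟨c, hc⟩ := Nat.exists_eq_add_of_lt hcut1
          rw [show pvCut ([] ++ (top, 0 + 1) :: l2) t 0 = c + 1 from by rw [← hdec]; omega,
            Nat.add_sub_cancel]
          simp only [List.nil_append, assignList, if_pos (by omega : (0:Int) < (top, 0 + 1).2)]
          rw [if_neg (by omega : ¬ (0:Int) < 0)]
          simp

-- B1: the binary search finds the unique leveling threshold
theorem bsearch_spec : ∀ (k : Nat) (items : List (String × Int)) (t lo hi : Int),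
    (hi - lo).toNat ≤ k → lo < hi → cappedB items lo ≤ t → t < cappedB items hi →
    lo ≤ bsearchB items t lo hi ∧ bsearchB items t lo hi < hi ∧
    cappedB items (bsearchB items t lo hi) ≤ t ∧
    t < cappedB items (bsearchB items t lo hi + 1) := by
  intro k
  induction k with
  | zero => intro items t lo hi hk hlt _ _; omega
  | succ k ih =>
    intro items t lo hi hk hlt hccl hcch
    by_cases h : 1 < hi - lo
    · have hm1 : lo + 1 ≤ PySem.Int.floordiv (lo + hi) 2 :=
        (PySem.Int.le_floordiv_iff_mul_le (by omega)).mpr (by omega)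
      have hm2 : PySem.Int.floordiv (lo + hi) 2 < hi :=
        (PySem.Int.floordiv_lt_iff_lt_mul (by omega)).mpr (by omega)
      have hunf : bsearchB items t lo hi
          = if cappedB items (PySem.Int.floordiv (lo + hi) 2) ≤ t
            then bsearchB items t (PySem.Int.floordiv (lo + hi) 2) hi
            else bsearchB items t lo (PySem.Int.floordiv (lo + hi) 2) := by
        rw [bsearchB.eq_def, dif_pos h]
      by_cases hcm : cappedB items (PySem.Int.floordiv (lo + hi) 2) ≤ t
      · rw [hunf, if_pos hcm]
        have := ih items t (PySem.Int.floordiv (lo + hi) 2) hi (by omega) (by omega) hcm hcch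
        exact ⟨by omega, this.2.1, this.2.2.1, this.2.2.2⟩
      · rw [hunf, if_neg hcm]
        have := ih items t lo (PySem.Int.floordiv (lo + hi) 2) (by omega) (by omega) hccl (by omega)
        exact ⟨this.1, by omega, this.2.2.1, this.2.2.2⟩
    · have hunf : bsearchB items t lo hi = lo := by rw [bsearchB.eq_def, dif_neg h]
      rw [hunf]
      have : hi = lo + 1 := by omega
      exact ⟨le_refl lo, by omega, hccl, by rw [← this]; exact hcch⟩

theorem trim_equal (pack : List (String × Int)) (t : Int)
    (hn : (pack.map Prod.fst).Nodup) : trim_pack_py pack t = trim_pack_py_alt pack t := by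
  have hfn : ((pack.filter (fun p => decide (0 < p.2))).map Prod.fst).Nodup :=
    hn.sublist (List.Sublist.map Prod.fst (List.filter_sublist (l := pack)))
  have hpos : pvPos (pack.filter (fun p => decide (0 < p.2))) := by
    intro p hp
    have := List.of_mem_filter hp
    simp only [decide_eq_true_eq] at this
    omega
  -- A's initial dict comprehension builds exactly the filtered pair list
  have hout : (pack.foldl (fun d p => if 0 < p.2 then d.insert p.1 p.2 else d)
      PySem.Dict.empty).items = pack.filter (fun p => decide (0 < p.2)) := by
    rw [PySem.List.foldl_ite_eq_foldl_filter]
    rw [PySem.Dict.items_foldl_insert_fresh _ Prod.fst Prod.snd _ (fun a _ => rfl) hfn]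
    simp [PySem.Dict.empty]
  simp only [trim_pack_py, trim_pack_py_alt]
  set D := pack.foldl (fun d p => if 0 < p.2 then d.insert p.1 p.2 else d) PySem.Dict.empty
    with hD
  set its := pack.filter (fun p => decide (0 < p.2)) with hits
  have hnD : D.keys.Nodup := by
    show (D.items.map Prod.fst).Nodup
    rw [hout]
    exact hfn
  have hposD : pvPos D.items := by rw [hout]; exact hpos
  rw [show D.values.sum = pvSum D.items from rfl]
  by_cases h1 : pvSum its ≤ t
  · rw [if_pos (show (its.map (fun p => p.2)).sum ≤ t from h1)]
    rw [trimLoopA.eq_def, dif_neg (by rw [hout]; intro hc; exact absurd hc.1 (by omega))]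
    rw [hout, ofList_items_of_nodup its hfn]
  · rw [if_neg (show ¬ (its.map (fun p => p.2)).sum ≤ t from h1)]
    by_cases h2 : t ≤ 0
    · rw [if_pos h2]
      exact loop_drain (pvSum D.items - t).toNat D t le_rfl hnD hposD h2
    · rw [if_neg h2]
      -- the pack is nonempty and has a positive maximum
      have hne : its ≠ [] := by
        intro h
        rw [h] at h1
        simp [pvSum] at h1
        omega
      obtain ⟨pm, hpm⟩ : ∃ pm, PySem.List.max? its (fun p => p.2) = some pm := by
        cases hmp : PySem.List.max? its (fun p => p.2) with
        | none => exact absurd ((PySem.List.max?_eq_none_iff its _).mp hmp) hne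
        | some pm => exact ⟨pm, rfl⟩
      have hpmem : pm ∈ its := PySem.List.max?_mem hpm
      have hpmax : ∀ q ∈ its, q.2 ≤ pm.2 := PySem.List.max?_isMax hpm
      have hpm1 : 1 ≤ pm.2 := hpos pm hpmem
      have hchi : cappedB its pm.2 = pvSum its := capped_eq_sum its pm.2 hpmax
      have hc0 : cappedB its 0 = 0 := capped_zero its hpos
      simp only [show PySem.List.max? (its.map (fun p => p.2)) (fun n => n)
          = Option.map (fun p => p.2) (PySem.List.max? its (fun x => x.2)) from
          max?_map (fun p => p.2) (fun n => n) its, hpm, Option.map_some, Option.getD_some]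
      have hbs := bsearch_spec (pm.2 - 0).toNat its t 0 pm.2 le_rfl (by omega)
        (by omega) (by omega)
      obtain ⟨L, hLdef⟩ : ∃ L, bsearchB its t 0 pm.2 = L := ⟨_, rfl⟩
      simp only [hLdef] at hbs ⊢
      have hmain := loop_main (pvSum D.items - t).toNat D t L le_rfl hnD hposD
        (by omega) (by rw [hout]; omega) hbs.1 (by rw [hout]; exact hbs.2.2.1)
        (by rw [hout]; exact hbs.2.2.2)
      rw [hmain, hout]
      rw [foldB_eq_assign L (((its.countP (fun p => decide (L < p.2)) : Nat) : Int))
        (t - cappedB its L) hbs.1 its 0 []]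
      rw [show ((((its.countP (fun p => decide (L < p.2)) : Nat) : Int))
          - (t - cappedB its L) - 0).toNat = pvCut its t L from by unfold pvCut pvBig; omega]
      rw [List.nil_append]
      rw [ofList_items_of_nodup _ (hfn.sublist (assign_keys_sublist L its (pvCut its t L)))]

-- ===== VERDICT (by name: the statement is the Claim_ definition above) =====
theorem trim_pack_py_spec : Claim_equal_trim_pack_py := by
  intro pack target_total _hdom hpre
  exact trim_equal pack target_total hpre
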